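-- pv_equiv track=rewrite | github.com/kodsnack/advent_of_code_2019 | Dyr-El-python/alt22.py | inv_prime
-- ===== SOURCE A (Python) =====
-- def inv_prime(num, p):
--     exp = p-2
--     mul = num
--     ans = 1
--     while exp > 0:
--         if exp % 2 == 1:
--             ans = (ans * mul) % p
--         exp //= 2
--         mul = (mul * mul) % p
--     return ans
-- ===== SOURCE B (Python) =====
-- def inv_prime(num, p):
--     # Stage 1: extract the binary digits of the exponent p-2, least significant first.
--     e = p - 2
--     bits = []
--     while e > 0:
--         bits.append(e % 2)
--         e //= 2
--     # Stage 2: left-to-right (MSB-first) square-and-multiply over the bit list.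
--     r = 1
--     for b in reversed(bits):
--         r = (r * r) % p
--         if b:
--             r = (r * num) % p
--     return r
-- ===== Notes on version B (the rewrite author's own statement) =====
-- stated objective: alternative
-- what changed: Replaced the single right-to-left while loop (squaring a running multiplier, multiplying into an accumulator on odd bits) by two staged passes: first build the bit list of the exponent p-2, then fold a left-to-right (MSB-first) square-and-multiply over the reversed bit list.
import Mathlib
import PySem

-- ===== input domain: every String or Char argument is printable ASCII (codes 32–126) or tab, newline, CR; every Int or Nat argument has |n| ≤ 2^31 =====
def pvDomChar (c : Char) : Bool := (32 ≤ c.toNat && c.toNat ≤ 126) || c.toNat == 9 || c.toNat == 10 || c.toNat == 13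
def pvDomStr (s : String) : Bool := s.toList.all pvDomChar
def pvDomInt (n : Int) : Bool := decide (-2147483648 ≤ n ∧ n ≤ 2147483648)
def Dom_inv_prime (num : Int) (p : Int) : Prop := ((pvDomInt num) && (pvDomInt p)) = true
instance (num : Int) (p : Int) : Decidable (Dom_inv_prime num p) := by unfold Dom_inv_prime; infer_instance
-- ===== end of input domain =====

-- B restructures A's single right-to-left square-and-multiply loop into two staged passes:
-- extract the exponent's bit list, then fold an MSB-first square-and-multiply over it
-- (same multiplication count; objective: alternative).

-- ===== PORT A =====
-- the while loop of A: state (exp, mul, ans)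
def invLoop (p : Int) (exp mul ans : Int) : Int :=
  if _h : 0 < exp then
    invLoop p (PySem.Int.floordiv exp 2) (PySem.Int.mod (mul * mul) p)
      (if PySem.Int.mod exp 2 = 1 then PySem.Int.mod (ans * mul) p else ans)
  else ans
termination_by exp.toNat
decreasing_by
  rw [PySem.Int.floordiv_eq_ediv_of_pos (by omega : (0:Int) < 2)]
  omega

def inv_prime (num : Int) (p : Int) : Int := invLoop p (p - 2) num 1

-- ===== PORT B =====
-- stage 1 of B: the bit list of e, least significant bit first (the while/append loop)
def bitsOf (e : Int) : List Int :=
  if _h : 0 < e then PySem.Int.mod e 2 :: bitsOf (PySem.Int.floordiv e 2) else []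
termination_by e.toNat
decreasing_by
  rw [PySem.Int.floordiv_eq_ediv_of_pos (by omega : (0:Int) < 2)]
  omega

-- stage 2 of B: one step of the MSB-first fold ('if b:' is b ≠ 0 in Python)
def sqmulStep (p num r b : Int) : Int :=
  let r2 := PySem.Int.mod (r * r) p
  if b ≠ 0 then PySem.Int.mod (r2 * num) p else r2

def inv_prime_alt (num : Int) (p : Int) : Int :=
  ((bitsOf (p - 2)).reverse).foldl (sqmulStep p num) 1

-- ===== PRECONDITION & SPEC =====
def Spec_inv_prime (num : Int) (p : Int) (out : Int) : Prop := out = inv_prime_alt num p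
instance (num : Int) (p : Int) (out : Int) : Decidable (Spec_inv_prime num p out) := by unfold Spec_inv_prime; infer_instance

-- ===== CLAIM (what is proved, stated in full; the proofs are below) =====
def Claim_equal_inv_prime : Prop := ∀ (num : Int) (p : Int), Dom_inv_prime num p → Spec_inv_prime num p (inv_prime num p)

-- ===== LEMMAS AND PROOFS =====

theorem pv_mul_emod_left (p a b : Int) : a % p * b % p = a * b % p := by
  conv_lhs => rw [Int.mul_emod]
  rw [Int.emod_emod_of_dvd _ (dvd_refl p), ← Int.mul_emod]

theorem pv_pow_emod (p a : Int) (k : Nat) : (a % p) ^ k % p = a ^ k % p := by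
  induction k with
  | zero => simp
  | succ k ih =>
    rw [pow_succ, pow_succ]
    conv_lhs => rw [Int.mul_emod]
    rw [ih, Int.emod_emod_of_dvd _ (dvd_refl p), ← Int.mul_emod]

-- unrolling the bit list of a positive e: reversed, it is (bits of e/2 reversed) ++ [e % 2]
theorem bitsOf_reverse_pos (e : Int) (he : 0 < e) :
    (bitsOf e).reverse = (bitsOf (e / 2)).reverse ++ [e % 2] := by
  rw [bitsOf, dif_pos he,
    PySem.Int.floordiv_eq_ediv_of_pos (by omega : (0:Int) < 2),
    PySem.Int.mod_eq_emod_of_pos (by omega : (0:Int) < 2)]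
  simp

theorem sqmulStep_emod (p num r b : Int) (hp : 0 < p) :
    sqmulStep p num r b = if b ≠ 0 then (r * r % p) * num % p else r * r % p := by
  simp [sqmulStep, PySem.Int.mod_eq_emod_of_pos hp]

-- B's fold over the reversed bit list of a positive e computes num^e mod p
theorem foldBits_eq (p num : Int) (hp : 0 < p) :
    ∀ n (e : Int), e.toNat = n → 0 < e →
      ((bitsOf e).reverse).foldl (sqmulStep p num) 1 = num ^ e.toNat % p := by
  intro n
  induction n using Nat.strong_induction_on with
  | _ n ih =>
    intro e hn he
    rw [bitsOf_reverse_pos e he, List.foldl_append]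
    simp only [List.foldl_cons, List.foldl_nil]
    rw [sqmulStep_emod _ _ _ _ hp]
    have hsq : ((bitsOf (e / 2)).reverse).foldl (sqmulStep p num) 1
        * ((bitsOf (e / 2)).reverse).foldl (sqmulStep p num) 1 % p
        = num ^ (2 * (e / 2).toNat) % p := by
      by_cases h0 : e / 2 = 0
      · rw [h0]
        rw [show bitsOf 0 = [] from by rw [bitsOf]; simp]
        norm_num
      · rw [ih (e / 2).toNat (by omega) (e / 2) rfl (by omega),
            ← Int.mul_emod, two_mul, pow_add]
    rw [hsq]
    by_cases hodd : e % 2 = 1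
    · rw [if_pos (show e % 2 ≠ 0 by omega), pv_mul_emod_left]
      have hE : e.toNat = 2 * (e / 2).toNat + 1 := by omega
      rw [hE, pow_succ]
    · rw [if_neg (show ¬ e % 2 ≠ 0 by omega)]
      have hE : e.toNat = 2 * (e / 2).toNat := by omega
      rw [hE]

-- A's loop invariant: invLoop p exp mul ans = (ans * mul^exp) % p for positive exp
theorem invLoop_eq (p : Int) (hp : 0 < p) :
    ∀ n (exp mul ans : Int), exp.toNat = n → 0 < exp →
      invLoop p exp mul ans = (ans * mul ^ exp.toNat) % p := by
  intro n
  induction n using Nat.strong_induction_on with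
  | _ n ih =>
    intro exp mul ans hn he
    rw [invLoop, dif_pos he]
    simp only [PySem.Int.floordiv_eq_ediv_of_pos (show (0:Int) < 2 by norm_num),
      PySem.Int.mod_eq_emod_of_pos hp,
      PySem.Int.mod_eq_emod_of_pos (show (0:Int) < 2 by norm_num)]
    by_cases h0 : exp / 2 = 0
    · have h1 : exp = 1 := by omega
      subst h1
      rw [if_pos (by norm_num), invLoop, dif_neg (by norm_num)]
      norm_num
    · rw [ih (exp / 2).toNat (by omega) (exp / 2) ((mul * mul) % p)
        (if exp % 2 = 1 then ans * mul % p else ans) rfl (by omega)]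
      have hpow : ((mul * mul) % p) ^ (exp / 2).toNat % p = mul ^ (2 * (exp / 2).toNat) % p := by
        rw [pv_pow_emod, two_mul, pow_add, mul_pow]
      by_cases hodd : exp % 2 = 1
      · rw [if_pos hodd]
        have hE : exp.toNat = 2 * (exp / 2).toNat + 1 := by omega
        rw [pv_mul_emod_left, Int.mul_emod (ans * mul), hpow, ← Int.mul_emod, hE, pow_succ]
        ring_nf
      · rw [if_neg hodd]
        have hE : exp.toNat = 2 * (exp / 2).toNat := by omega
        rw [Int.mul_emod ans, hpow, ← Int.mul_emod, hE]

-- ===== VERDICT (by name: the statement is the Claim_ definition above) =====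
theorem inv_prime_spec : Claim_equal_inv_prime := by
  intro num p _
  unfold Spec_inv_prime inv_prime inv_prime_alt
  by_cases hp : p - 2 ≤ 0
  · have hb : bitsOf (p - 2) = [] := by rw [bitsOf]; exact dif_neg (by omega)
    rw [invLoop, dif_neg (by omega), hb]
    simp
  · have hpos : (0:Int) < p := by omega
    rw [invLoop_eq p hpos (p - 2).toNat (p - 2) num 1 rfl (by omega),
        foldBits_eq p num hpos (p - 2).toNat (p - 2) rfl (by omega)]
    rw [one_mul]
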